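-- pv_equiv track=rewrite | github.com/Cicerolibardi/mc102 | recursão/folhas.py | descobrir_tipo
-- ===== SOURCE A (Python) =====
-- def descobrir_tipo(w_folha, h_folha, tipo_folha, w_retangulo, h_retangulo):
--     """Devolve o tipo da menor folha em que cabe o retângulo ou None se não couber."""
--     if w_retangulo > w_folha or h_retangulo > h_folha:  #se o retângulo não cabe na folha
--         return None
--
--     else: #se o retângulo cabe, caso geral
--         #achar o caso menor
--         w_menor = h_folha // 2
--         h_menor = w_folha
--         tipo_menor = tipo_folha + 1
--
--         #chamar recursivamente
--         tipo_minimo_menor = descobrir_tipo(w_menor, h_menor, tipo_menor, w_retangulo, h_retangulo)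
--
--         #combinar a resposta da recursão
--         if tipo_minimo_menor is None:
--             return tipo_folha
--         else:
--             return tipo_minimo_menor
-- ===== SOURCE B (Python) =====
-- def descobrir_tipo(w_folha, h_folha, tipo_folha, w_retangulo, h_retangulo):
--     """Devolve o tipo da menor folha em que cabe o retângulo ou None se não couber."""
--     if w_retangulo > w_folha or h_retangulo > h_folha:
--         return None
--     # Two sheet-generations per iteration: rotating twice halves both dimensions,
--     # so we keep halving (w, h) and test the intermediate rotated sheet in between.
--     while True:
--         if w_retangulo > h_folha // 2 or h_retangulo > w_folha:
--             return tipo_folha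
--         if w_retangulo > w_folha // 2 or h_retangulo > h_folha // 2:
--             return tipo_folha + 1
--         w_folha, h_folha, tipo_folha = w_folha // 2, h_folha // 2, tipo_folha + 2
-- ===== Notes on version B (the rewrite author's own statement) =====
-- stated objective: alternative
-- what changed: Replaced the one-step recursive descend-then-combine with an iterative loop that processes TWO sheet generations per iteration: since rotating-and-halving twice simply halves both dimensions, B keeps halving (w, h) jointly, testing the intermediate rotated sheet in between, and never recombines results.
-- outside the precondition, e.g. on descobrir_tipo(-5, 3, 0, 0, 0): A returns None, B returns None; on descobrir_tipo(0, -2, 7, 0, -5): A returns 7, B returns 7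
import Mathlib
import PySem

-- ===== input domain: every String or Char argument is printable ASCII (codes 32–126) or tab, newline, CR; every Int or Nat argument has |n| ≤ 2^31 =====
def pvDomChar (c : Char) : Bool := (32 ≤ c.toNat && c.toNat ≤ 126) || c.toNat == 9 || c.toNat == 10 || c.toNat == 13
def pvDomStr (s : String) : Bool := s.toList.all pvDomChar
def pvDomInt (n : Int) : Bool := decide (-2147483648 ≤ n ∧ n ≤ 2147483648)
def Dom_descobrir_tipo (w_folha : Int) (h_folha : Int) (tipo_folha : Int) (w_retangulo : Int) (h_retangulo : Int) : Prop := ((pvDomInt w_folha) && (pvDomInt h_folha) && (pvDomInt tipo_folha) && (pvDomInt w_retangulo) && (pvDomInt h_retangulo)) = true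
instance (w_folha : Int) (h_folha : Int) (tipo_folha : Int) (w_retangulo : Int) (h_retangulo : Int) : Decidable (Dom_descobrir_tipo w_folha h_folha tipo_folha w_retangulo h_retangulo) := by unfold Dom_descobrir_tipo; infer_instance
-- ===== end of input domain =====

-- B replaces A's one-step recursive descend-then-combine by a loop that halves BOTH sheet
-- dimensions per iteration (two generations at once, testing the intermediate rotated sheet
-- in between) and never recombines results (objective: alternative); A = B on Pre_ below.

-- ===== PORT A =====
-- A's recursion is total only on Pre_; the fuel 201 strictly exceeds the maximal recursion
-- depth reachable on Dom ∩ Pre_ (≤ 66, since |dims| ≤ 2^31 and the sheet halves every two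
-- steps), so on the admitted inputs the port computes exactly what the Python computes.
def pvAGo : Nat → Int → Int → Int → Int → Int → Option Int
  | 0, _, _, _, _, _ => none  -- fuel exhaustion, unreachable on Dom ∩ Pre_
  | f+1, w_folha, h_folha, tipo_folha, w_retangulo, h_retangulo =>
    if w_retangulo > w_folha ∨ h_retangulo > h_folha then none
    else
      let w_menor := PySem.Int.floordiv h_folha 2
      let h_menor := w_folha
      let tipo_menor := tipo_folha + 1
      match pvAGo f w_menor h_menor tipo_menor w_retangulo h_retangulo with
      | none => some tipo_folha
      | some x => some x

def descobrir_tipo (w_folha : Int) (h_folha : Int) (tipo_folha : Int) (w_retangulo : Int) (h_retangulo : Int) : Option Int :=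
  pvAGo 201 w_folha h_folha tipo_folha w_retangulo h_retangulo

-- ===== PORT B =====
-- B's two-generations-per-iteration loop; fuel 100 exceeds the iteration count on Dom ∩ Pre_.
def pvBGo : Nat → Int → Int → Int → Int → Int → Option Int
  | 0, _, _, tipo_folha, _, _ => some tipo_folha  -- fuel exhaustion, unreachable on Dom ∩ Pre_
  | f+1, w_folha, h_folha, tipo_folha, w_retangulo, h_retangulo =>
    if w_retangulo > PySem.Int.floordiv h_folha 2 ∨ h_retangulo > w_folha then some tipo_folha
    else if w_retangulo > PySem.Int.floordiv w_folha 2 ∨ h_retangulo > PySem.Int.floordiv h_folha 2 then some (tipo_folha + 1)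
    else pvBGo f (PySem.Int.floordiv w_folha 2) (PySem.Int.floordiv h_folha 2) (tipo_folha + 2) w_retangulo h_retangulo

def descobrir_tipo_alt (w_folha : Int) (h_folha : Int) (tipo_folha : Int) (w_retangulo : Int) (h_retangulo : Int) : Option Int :=
  if w_retangulo > w_folha ∨ h_retangulo > h_folha then none
  else pvBGo 100 w_folha h_folha tipo_folha w_retangulo h_retangulo

-- ===== PRECONDITION & SPEC =====
-- Pre_ excludes rectangles with both dimensions ≤ 0: on those A can recurse without bound
-- (RecursionError in Python); on the excluded inputs where A does return, B returns the same value.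
def Pre_descobrir_tipo (w_folha : Int) (h_folha : Int) (tipo_folha : Int) (w_retangulo : Int) (h_retangulo : Int) : Prop :=
  1 ≤ w_retangulo ∨ 1 ≤ h_retangulo
instance (w_folha : Int) (h_folha : Int) (tipo_folha : Int) (w_retangulo : Int) (h_retangulo : Int) : Decidable (Pre_descobrir_tipo w_folha h_folha tipo_folha w_retangulo h_retangulo) := by unfold Pre_descobrir_tipo; infer_instance

def pvWitness_descobrir_tipo : Int × Int × Int × Int × Int := (4, 4, 0, 1, 1)

def Spec_descobrir_tipo (w_folha : Int) (h_folha : Int) (tipo_folha : Int) (w_retangulo : Int) (h_retangulo : Int) (out : Option Int) : Prop := out = descobrir_tipo_alt w_folha h_folha tipo_folha w_retangulo h_retangulo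
instance (w_folha : Int) (h_folha : Int) (tipo_folha : Int) (w_retangulo : Int) (h_retangulo : Int) (out : Option Int) : Decidable (Spec_descobrir_tipo w_folha h_folha tipo_folha w_retangulo h_retangulo out) := by unfold Spec_descobrir_tipo; infer_instance

-- ===== CLAIM (what is proved, stated in full; the proofs are below) =====
def Claim_equal_descobrir_tipo : Prop := ∀ (w_folha : Int) (h_folha : Int) (tipo_folha : Int) (w_retangulo : Int) (h_retangulo : Int), Dom_descobrir_tipo w_folha h_folha tipo_folha w_retangulo h_retangulo → Pre_descobrir_tipo w_folha h_folha tipo_folha w_retangulo h_retangulo → Spec_descobrir_tipo w_folha h_folha tipo_folha w_retangulo h_retangulo (descobrir_tipo w_folha h_folha tipo_folha w_retangulo h_retangulo)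

-- ===== LEMMAS AND PROOFS =====

-- B's loop always returns a value.
theorem pvBGo_ne_none (f : Nat) : ∀ (w h t wr hr : Int), pvBGo f w h t wr hr ≠ none := by
  induction f with
  | zero => intro w h t wr hr; simp [pvBGo]
  | succ f ih =>
    intro w h t wr hr
    simp only [pvBGo]
    split
    · simp
    · split
      · simp
      · exact ih _ _ _ _ _

-- On a sheet that fits, TWO unfoldings of A's recursion per unit of B's fuel compute B's loop:
-- the sheet after two A-steps of (w, h) is (w//2, h//2), the intermediate one is (h//2, w).
theorem pvAGo_eq_pvBGo (f : Nat) : ∀ (w h t wr hr : Int), ¬(wr > w ∨ hr > h) →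
    pvAGo (2*f+1) w h t wr hr = pvBGo f w h t wr hr := by
  induction f with
  | zero =>
    intro w h t wr hr hfit
    by_cases hnext : wr > PySem.Int.floordiv h 2 ∨ hr > w
    · simp [pvAGo, pvBGo, hfit]
    · simp [pvAGo, pvBGo, hfit]
  | succ f ih =>
    intro w h t wr hr hfit
    have step : ∀ (g : Nat) (w h t : Int), pvAGo (g+1) w h t wr hr =
        if wr > w ∨ hr > h then none
        else match pvAGo g (PySem.Int.floordiv h 2) w (t+1) wr hr with
          | none => some t
          | some x => some x := fun _ _ _ _ => rfl
    have stepB : pvBGo (f+1) w h t wr hr =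
        if wr > PySem.Int.floordiv h 2 ∨ hr > w then some t
        else if wr > PySem.Int.floordiv w 2 ∨ hr > PySem.Int.floordiv h 2 then some (t + 1)
        else pvBGo f (PySem.Int.floordiv w 2) (PySem.Int.floordiv h 2) (t+2) wr hr := rfl
    have e1 : 2*(f+1)+1 = (2*f+2)+1 := by ring
    rw [e1, step ((2*f)+2) w h t, if_neg hfit, stepB]
    by_cases hnext : wr > PySem.Int.floordiv h 2 ∨ hr > w
    · -- intermediate rotated sheet does not fit: A's inner call returns none, B stops at t
      rw [step ((2*f)+1), if_pos hnext, if_pos hnext]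
    · rw [if_neg hnext, step ((2*f)+1) _ _ (t+1), if_neg hnext]
      by_cases hnext2 : wr > PySem.Int.floordiv w 2 ∨ hr > PySem.Int.floordiv h 2
      · -- the doubly-halved sheet does not fit: A returns t+1, B stops at t+1
        rw [step (2*f) _ _ (t+1+1), if_pos hnext2, if_pos hnext2]
      · rw [if_neg hnext2, ih _ _ (t+1+1) _ _ hnext2]
        rcases hres : pvBGo f (PySem.Int.floordiv w 2) (PySem.Int.floordiv h 2) (t+1+1) wr hr with _ | x
        · exact absurd hres (pvBGo_ne_none _ _ _ _ _ _)
        · have e2 : t + 1 + 1 = t + 2 := by ring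
          rw [e2] at hres
          rw [hres]

-- ===== VERDICT (by name: the statement is the Claim_ definition above) =====
theorem descobrir_tipo_spec : Claim_equal_descobrir_tipo := by
  intro w h t wr hr _ _
  unfold Spec_descobrir_tipo descobrir_tipo descobrir_tipo_alt
  by_cases hfit : wr > w ∨ hr > h
  · simp [pvAGo, hfit]
  · rw [if_neg hfit]
    exact pvAGo_eq_pvBGo 100 w h t wr hr hfit
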